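-- pv_equiv track=rewrite | github.com/TrigonaMinima/MinimaPy | sentence_boundary.py | que_ex
-- ===== SOURCE A (Python) =====
-- def que_ex(data):
--     """
--     Handles full sentences in between quotes
--     Handles question and exclamation marks as sentence boundaries.
--     Does not handle the abbreviations or salutations (Dr./Ms. etc)
--     """
--     ndata = []
--     st = []
--     for i in data:
--         if i == '"':
--             if not st:
--                 st.append(i)
--             else:
--                 st.pop(-1)
--             ndata.append('"')
--         else:
--             bound = ""
--             if st:
--                 bound = st.pop(-1)
--
--             if not bound:
--                 if i == ".":
--                     ndata.append(".|")
--                 elif i == "?":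
--                     ndata.append("?|")
--                 elif i == "!":
--                     ndata.append("!|")
--                 else:
--                     ndata.append(i)
--             else:
--                 ndata.append(i)
--                 st.append(bound)
--
--     return "".join(ndata)
-- ===== SOURCE B (Python) =====
-- _TABLE = str.maketrans({".": ".|", "?": "?|", "!": "!|"})
--
-- def que_ex(data):
--     parts = data.split('"')
--     return '"'.join(p.translate(_TABLE) if i % 2 == 0 else p
--                     for i, p in enumerate(parts))
-- ===== Notes on version B (the rewrite author's own statement) =====
-- stated objective: simpler
-- what changed: Replaces A's stateful char-by-char loop with an explicit quote stack by a split-map-join pass: split the text on the double-quote character, apply the sentence-boundary translation table only to even-indexed (outside-quote) segments, and rejoin.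
import Mathlib
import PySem

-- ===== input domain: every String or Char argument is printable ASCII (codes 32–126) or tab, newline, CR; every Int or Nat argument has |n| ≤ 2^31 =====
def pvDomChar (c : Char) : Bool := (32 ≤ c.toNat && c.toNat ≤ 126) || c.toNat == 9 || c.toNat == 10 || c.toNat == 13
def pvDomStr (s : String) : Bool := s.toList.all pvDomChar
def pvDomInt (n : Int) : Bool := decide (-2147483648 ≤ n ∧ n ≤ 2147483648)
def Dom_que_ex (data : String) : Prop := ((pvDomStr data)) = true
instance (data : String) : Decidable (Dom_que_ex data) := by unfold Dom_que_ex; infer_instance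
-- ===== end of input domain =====

-- B replaces A's stateful char-by-char quote-stack loop by split-on-'"' / mark even
-- segments / join (objective: simpler). Return values agree on all inputs; A is total.

-- ===== PORT A =====
-- one step of A's for-loop; the Python stack st (append / pop(-1)) is carried as a
-- List Char used at its head (top of stack), the same stack in reverse storage order
def que_exStep (p : List String × List Char) (i : Char) : List String × List Char :=
  let ndata := p.1
  let st := p.2
  if i == '"' then
    if st.isEmpty then (ndata ++ ["\""], '"' :: st)
    else (ndata ++ ["\""], st.tail)
  else
    -- bound = ""; if st: bound = st.pop(-1)
    let bound : String := match st with | [] => "" | b :: _ => String.ofList [b]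
    let st' : List Char := match st with | [] => st | _ :: rest => rest
    if bound == "" then
      if i == '.' then (ndata ++ [".|"], st')
      else if i == '?' then (ndata ++ ["?|"], st')
      else if i == '!' then (ndata ++ ["!|"], st')
      else (ndata ++ [String.ofList [i]], st')
    else
      (ndata ++ [String.ofList [i]], bound.toList ++ st')   -- st.append(bound)

def que_ex (data : String) : String :=
  PySem.Str.join "" (data.toList.foldl que_exStep ([], [])).1

-- ===== PORT B =====
-- the translation table: '.'→".|", '?'→"?|", '!'→"!|", every other char unchanged
def que_exSub (c : Char) : List Char :=
  if c == '.' then ['.', '|']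
  else if c == '?' then ['?', '|']
  else if c == '!' then ['!', '|']
  else [c]

def que_ex_alt (data : String) : String :=
  let parts := PySem.Chars.splitOn data.toList ['"']
  let processed := (PySem.List.enumerate parts).map
    (fun p => if PySem.Int.mod p.1 2 == 0 then p.2.flatMap que_exSub else p.2)
  String.ofList (PySem.Chars.join ['"'] processed)

-- ===== PRECONDITION & SPEC =====
def Spec_que_ex (data : String) (out : String) : Prop := out = que_ex_alt data
instance (data : String) (out : String) : Decidable (Spec_que_ex data out) := by unfold Spec_que_ex; infer_instance

-- ===== CLAIM (what is proved, stated in full; the proofs are below) =====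
def Claim_equal_que_ex : Prop := ∀ (data : String), Dom_que_ex data → Spec_que_ex data (que_ex data)

-- ===== LEMMAS AND PROOFS =====

-- reference semantics: per-character pass with an inside-quotes flag
def procA (b : Bool) : List Char → List Char
  | [] => []
  | c :: cs =>
      if c = '"' then '"' :: procA (!b) cs
      else (if b then [c] else que_exSub c) ++ procA b cs

-- A's ndata entries, as a list of strings
def procAS (b : Bool) : List Char → List String
  | [] => []
  | c :: cs =>
      if c = '"' then "\"" :: procAS (!b) cs
      else if b then String.ofList [c] :: procAS b cs
      else (if c = '.' then ".|" else if c = '?' then "?|"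
            else if c = '!' then "!|" else String.ofList [c]) :: procAS b cs

-- split on '"' with an explicit accumulated segment
def splitQ (pre : List Char) : List Char → List (List Char)
  | [] => [pre]
  | c :: cs => if c = '"' then pre :: splitQ [] cs else splitQ (pre ++ [c]) cs

-- alternating processing of the segments: even (outside quotes) / odd (inside)
mutual
  def altE : List (List Char) → List (List Char)
    | [] => []
    | p :: ps => p.flatMap que_exSub :: altO ps
  def altO : List (List Char) → List (List Char)
    | [] => []
    | p :: ps => p :: altE ps
end

lemma step_quote_out (nd : List String) :
    que_exStep (nd, []) '"' = (nd ++ ["\""], ['"']) := by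
  simp [que_exStep]

lemma step_quote_in (nd : List String) :
    que_exStep (nd, ['"']) '"' = (nd ++ ["\""], []) := by
  simp [que_exStep]

lemma step_out (nd : List String) (c : Char) (hq : ¬ c = '"') :
    que_exStep (nd, []) c
      = (nd ++ [if c = '.' then ".|" else if c = '?' then "?|"
                else if c = '!' then "!|" else String.ofList [c]], []) := by
  simp only [que_exStep]
  rw [if_neg (by simpa using hq)]
  split_ifs <;> simp_all

lemma step_in (nd : List String) (c : Char) (hq : ¬ c = '"') :
    que_exStep (nd, ['"']) c = (nd ++ [String.ofList [c]], ['"']) := by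
  have hb : ((String.ofList ['"'] : String) == "") = false := by decide
  have ht : (String.ofList ['"']).toList = ['"'] := by decide
  simp only [que_exStep]
  rw [if_neg (by simpa using hq)]
  simp [hb, ht]

lemma foldA (cs : List Char) : ∀ (nd : List String),
    ((cs.foldl que_exStep (nd, [])).1 = nd ++ procAS false cs)
    ∧ ((cs.foldl que_exStep (nd, ['"'])).1 = nd ++ procAS true cs) := by
  induction cs with
  | nil => intro nd; simp [procAS]
  | cons c cs ih =>
      intro nd
      by_cases hq : c = '"'
      · subst hq
        refine ⟨?_, ?_⟩
        · rw [List.foldl_cons, step_quote_out, (ih _).2]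
          simp [procAS]
        · rw [List.foldl_cons, step_quote_in, (ih _).1]
          simp [procAS]
      · refine ⟨?_, ?_⟩
        · rw [List.foldl_cons, step_out nd c hq, (ih _).1]
          simp [procAS, hq]
        · rw [List.foldl_cons, step_in nd c hq, (ih _).2]
          simp [procAS, hq]

lemma joinNil (L : List (List Char)) : PySem.Chars.join [] L = L.flatten := by
  induction L with
  | nil => simp [PySem.Chars.join_nil]
  | cons a L ih =>
      cases L with
      | nil => simp [PySem.Chars.join_singleton]
      | cons b L => simp [PySem.Chars.join_cons_cons] at *; simpa using ih

lemma procAS_flat (b : Bool) (cs : List Char) :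
    ((procAS b cs).map String.toList).flatten = procA b cs := by
  induction cs generalizing b with
  | nil => simp [procAS, procA]
  | cons c cs ih =>
      by_cases hq : c = '"'
      · subst hq; simp [procAS, procA, ih]
      · cases b with
        | false =>
            by_cases h1 : c = '.'
            · subst h1; simp [procAS, procA, que_exSub, ih]
            · by_cases h2 : c = '?'
              · subst h2; simp [procAS, procA, que_exSub, ih]
              · by_cases h3 : c = '!'
                · subst h3; simp [procAS, procA, que_exSub, ih]
                · simp [procAS, procA, que_exSub, hq, h1, h2, h3, ih]
        | true => simp [procAS, procA, hq, ih]

lemma splitQ_ne_nil (pre cs) : splitQ pre cs ≠ [] := by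
  induction cs generalizing pre with
  | nil => simp [splitQ]
  | cons c cs ih => by_cases h : c = '"' <;> simp [splitQ, h, ih]

lemma go_eq (fuel : Nat) : ∀ (l cur : List Char) (acc : List (List Char)),
    l.length ≤ fuel →
    PySem.Chars.splitOn.go ['"'] fuel l cur acc = acc.reverse ++ splitQ cur.reverse l := by
  induction fuel with
  | zero =>
      intro l cur acc h
      have hl : l = [] := by cases l <;> simp_all
      subst hl
      rw [PySem.Chars.splitOn.go.eq_def]
      simp [splitQ]
  | succ fuel ih =>
      intro l cur acc h
      cases l with
      | nil =>
          rw [PySem.Chars.splitOn.go.eq_def]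
          simp [splitQ]
      | cons c rest =>
          by_cases hq : c = '"'
          · subst hq
            rw [PySem.Chars.splitOn.go.eq_def]
            have hp : (['"'].isPrefixOf ('"' :: rest)) = true := by
              simp [List.isPrefixOf]
            simp only [hp, if_true, List.length_cons, List.length_nil,
              List.drop_succ_cons, List.drop_zero]
            rw [ih rest [] ((cur.reverse) :: acc) (by simpa using Nat.le_of_succ_le_succ h)]
            simp [splitQ]
          · rw [PySem.Chars.splitOn.go.eq_def]
            have hp : (['"'].isPrefixOf (c :: rest)) = false := by
              simp [List.isPrefixOf]; exact fun h' => hq h'.symm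
            simp only [hp]
            rw [if_neg (by simp)]
            rw [ih rest (c :: cur) acc (by simpa using Nat.le_of_succ_le_succ h)]
            simp [splitQ, hq]

lemma splitOn_eq_splitQ (cs : List Char) :
    PySem.Chars.splitOn cs ['"'] = splitQ [] cs := by
  have := go_eq (cs.length + 1) cs [] [] (by omega)
  simpa [PySem.Chars.splitOn] using this

lemma pymod_two (k : Int) : PySem.Int.mod k 2 = k % 2 := by
  simp [PySem.Int.mod, Int.fmod_eq_emod]

lemma enum_alt (ps : List (List Char)) : ∀ (k : Int), 0 ≤ k →
    (PySem.List.enumerate ps k).map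
        (fun p => if PySem.Int.mod p.1 2 == 0 then p.2.flatMap que_exSub else p.2)
      = if PySem.Int.mod k 2 == 0 then altE ps else altO ps := by
  induction ps with
  | nil => intro k _; simp [PySem.List.enumerate_nil, altE, altO]
  | cons p ps ih =>
      intro k hk
      rw [PySem.List.enumerate_cons]
      simp only [List.map_cons]
      rw [ih (k + 1) (by omega)]
      simp only [pymod_two]
      by_cases he : k % 2 = 0
      · have h1 : (k + 1) % 2 = 1 := by omega
        simp [he, h1, altE]
      · have h0 : k % 2 = 1 := by omega
        have h1 : (k + 1) % 2 = 0 := by omega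
        simp [h0, h1, altO]

lemma join_altE_altO (cs : List Char) :
    (∀ pre, PySem.Chars.join ['"'] (altE (splitQ pre cs))
        = pre.flatMap que_exSub ++ procA false cs) ∧
    (∀ pre, PySem.Chars.join ['"'] (altO (splitQ pre cs)) = pre ++ procA true cs) := by
  induction cs with
  | nil =>
      constructor <;> intro pre <;>
        simp [splitQ, altE, altO, PySem.Chars.join_singleton, procA]
  | cons c cs ih =>
      obtain ⟨ihE, ihO⟩ := ih
      by_cases hq : c = '"'
      · subst hq
        obtain ⟨q, qs, hqs⟩ : ∃ q qs, splitQ ([] : List Char) cs = q :: qs := by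
          cases h : splitQ ([] : List Char) cs with
          | nil => exact absurd h (splitQ_ne_nil _ _)
          | cons q qs => exact ⟨q, qs, rfl⟩
        have hs : ∀ pre : List Char, splitQ pre ('"' :: cs) = pre :: q :: qs := by
          intro pre; simp [splitQ, hqs]
        constructor <;> intro pre
        · rw [hs pre]
          rw [show altE (pre :: q :: qs) = pre.flatMap que_exSub :: q :: altE qs from by
            simp [altE, altO]]
          rw [PySem.Chars.join_cons_cons]
          have hO' : PySem.Chars.join ['"'] (q :: altE qs) = procA true cs := by
            have h := ihO []
            rw [hqs] at h
            simpa [altO] using h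
          rw [hO']
          simp [procA]
        · rw [hs pre]
          rw [show altO (pre :: q :: qs) = pre :: q.flatMap que_exSub :: altO qs from by
            simp [altO, altE]]
          rw [PySem.Chars.join_cons_cons]
          have hE' : PySem.Chars.join ['"'] (q.flatMap que_exSub :: altO qs)
              = procA false cs := by
            have h := ihE []
            rw [hqs] at h
            simpa [altE] using h
          rw [hE']
          simp [procA]
      · constructor <;> intro pre
        · rw [show splitQ pre (c :: cs) = splitQ (pre ++ [c]) cs from by simp [splitQ, hq]]
          rw [ihE (pre ++ [c])]
          simp [procA, hq]
        · rw [show splitQ pre (c :: cs) = splitQ (pre ++ [c]) cs from by simp [splitQ, hq]]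
          rw [ihO (pre ++ [c])]
          simp [procA, hq]

lemma que_ex_eq_procA (data : String) :
    que_ex data = PySem.Str.join "" (procAS false data.toList) := by
  simp only [que_ex]
  rw [(foldA data.toList []).1]
  simp

lemma que_ex_alt_eq_procA (data : String) :
    que_ex_alt data = String.ofList (procA false data.toList) := by
  simp only [que_ex_alt]
  rw [splitOn_eq_splitQ]
  rw [enum_alt _ 0 (by norm_num)]
  rw [if_pos (by decide : (PySem.Int.mod 0 2 == 0) = true)]
  rw [(join_altE_altO data.toList).1 []]
  simp

-- ===== VERDICT (by name: the statement is the Claim_ definition above) =====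
theorem que_ex_spec : Claim_equal_que_ex := by
  intro data _
  unfold Spec_que_ex
  rw [que_ex_eq_procA, que_ex_alt_eq_procA]
  have hj : (PySem.Str.join "" (procAS false data.toList)).toList
      = procA false data.toList := by
    rw [PySem.Str.toList_join]
    have h0 : ("" : String).toList = [] := rfl
    rw [h0, joinNil]
    exact procAS_flat false data.toList
  rw [← String.toList_inj, hj, String.toList_ofList]
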